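-- pv_equiv track=rewrite | github.com/Sahil-4/dsapractice | Y2026/APRIL2026/D011/main.py | countIncreasing
-- ===== SOURCE A (Python) =====
-- def countIncreasing(arr):
--     # code here.
--
--     N = len(arr)
--
--     count = 0
--     length = 1
--
--     for i in range(1, N):
--         if arr[i] > arr[i - 1]:
--             length += 1
--         else:
--             count += (length * (length - 1)) // 2
--             length = 1
--
--     count += (length * (length - 1)) // 2
--
--     return count
-- ===== SOURCE B (Python) =====
-- def countIncreasing(arr):
--     total = 0
--     cur = 0
--     for prev, x in zip(arr, arr[1:]):
--         if x > prev:
--             cur += 1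
--         else:
--             cur = 0
--         total += cur
--     return total
-- ===== Notes on version B (the rewrite author's own statement) =====
-- stated objective: alternative
-- what changed: Instead of tracking run lengths and adding a closed-form L*(L-1)//2 per run (plus a trailing flush after the loop), B zips adjacent pairs and incrementally accumulates the series term-by-term: cur counts consecutive increasing adjacencies ending here and is added to the total each step, so no division and no post-loop step are needed.
import Mathlib
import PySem

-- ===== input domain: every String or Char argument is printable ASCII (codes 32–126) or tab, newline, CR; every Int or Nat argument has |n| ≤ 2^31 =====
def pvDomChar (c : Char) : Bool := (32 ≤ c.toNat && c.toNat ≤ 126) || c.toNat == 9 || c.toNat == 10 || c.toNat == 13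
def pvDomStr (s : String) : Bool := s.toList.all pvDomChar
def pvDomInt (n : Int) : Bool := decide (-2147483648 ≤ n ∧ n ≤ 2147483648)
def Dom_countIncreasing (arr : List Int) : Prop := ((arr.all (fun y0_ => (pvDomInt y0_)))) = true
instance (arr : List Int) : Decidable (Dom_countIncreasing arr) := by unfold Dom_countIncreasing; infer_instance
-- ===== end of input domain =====

-- B sums the per-run arithmetic series term-by-term over adjacent pairs instead of A's closed-form L*(L-1)//2 per run; alternative decomposition, same O(n) cost.

-- ===== PORT A =====
-- loop body of A: state (count, length), index i; arr[i]/arr[i-1] are always in range for i ∈ range(1, N)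
def countIncreasingStep (arr : List Int) (st : Int × Int) (i : Int) : Int × Int :=
  if PySem.List.pyGetD arr i 0 > PySem.List.pyGetD arr (i - 1) 0 then
    (st.1, st.2 + 1)
  else
    (st.1 + PySem.Int.floordiv (st.2 * (st.2 - 1)) 2, 1)

def countIncreasing (arr : List Int) : Int :=
  let N : Int := arr.length
  let s := (PySem.List.pyRange 1 N 1).foldl (countIncreasingStep arr) (0, 1)
  s.1 + PySem.Int.floordiv (s.2 * (s.2 - 1)) 2

-- ===== PORT B =====
-- loop body of B: state (total, cur), pair (prev, x)
def countIncreasingAltStep (st : Int × Int) (p : Int × Int) : Int × Int :=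
  let cur := if p.2 > p.1 then st.2 + 1 else 0
  (st.1 + cur, cur)

def countIncreasing_alt (arr : List Int) : Int :=
  ((arr.zip (arr.drop 1)).foldl countIncreasingAltStep (0, 0)).1

-- ===== PRECONDITION & SPEC =====
def Spec_countIncreasing (arr : List Int) (out : Int) : Prop := out = countIncreasing_alt arr
instance (arr : List Int) (out : Int) : Decidable (Spec_countIncreasing arr out) := by unfold Spec_countIncreasing; infer_instance

-- ===== CLAIM (what is proved, stated in full; the proofs are below) =====
def Claim_equal_countIncreasing : Prop := ∀ (arr : List Int), Dom_countIncreasing arr → Spec_countIncreasing arr (countIncreasing arr)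

-- ===== LEMMAS AND PROOFS =====

-- pair-list version of A's loop body (proof helper)
def stepAPair (st : Int × Int) (p : Int × Int) : Int × Int :=
  if p.2 > p.1 then (st.1, st.2 + 1)
  else (st.1 + PySem.Int.floordiv (st.2 * (st.2 - 1)) 2, 1)

-- A's index fold over range(j+1, N) equals a fold over the adjacent pairs of arr.drop j.
theorem foldl_idx_eq_foldl_zip (arr : List Int) :
    ∀ (n j : Nat) (st : Int × Int), arr.length - j ≤ n →
      (PySem.List.pyRange ((j : Int) + 1) arr.length 1).foldl (countIncreasingStep arr) st
        = ((arr.drop j).zip (arr.drop (j + 1))).foldl stepAPair st := by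
  intro n
  induction n with
  | zero =>
    intro j st h
    rw [PySem.List.pyRange_one_eq_nil (by exact_mod_cast (by omega : arr.length ≤ j + 1)),
        List.drop_eq_nil_of_le (by omega : arr.length ≤ j)]
    simp
  | succ n ih =>
    intro j st h
    by_cases hj : j + 1 < arr.length
    · have hstep : PySem.List.pyRange ((j : Int) + 1) arr.length 1
          = ((j : Int) + 1) :: PySem.List.pyRange ((j : Int) + 1 + 1) arr.length 1 :=
        PySem.List.pyRange_one_cons (by exact_mod_cast hj)
      have hcast : ((j : Int) + 1) = ((j + 1 : Nat) : Int) := by push_cast; ring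
      have e1 : PySem.List.pyGetD arr ((j : Int) + 1) 0 = arr[j + 1] := by
        rw [hcast, PySem.List.pyGetD_natCast]
        simp [List.getD_eq_getElem?_getD, List.getElem?_eq_getElem hj]
      have e2 : PySem.List.pyGetD arr ((j : Int) + 1 - 1) 0 = arr[j] := by
        rw [show ((j : Int) + 1 - 1) = ((j : Nat) : Int) by ring, PySem.List.pyGetD_natCast]
        simp [List.getD_eq_getElem?_getD, List.getElem?_eq_getElem (show j < arr.length by omega)]
      have hA : countIncreasingStep arr st ((j : Int) + 1)
          = stepAPair st (arr[j], arr[j + 1]) := by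
        unfold countIncreasingStep stepAPair
        rw [e1, e2]
      have hd2 : arr.drop (j + 1) = arr[j + 1] :: arr.drop (j + 1 + 1) :=
        List.drop_eq_getElem_cons hj
      have hd1 : arr.drop j = arr[j] :: arr.drop (j + 1) :=
        List.drop_eq_getElem_cons (by omega)
      rw [hd2, hd1, List.zip_cons_cons, List.foldl_cons,
          hstep, List.foldl_cons, hA, hcast, ih (j + 1) _ (by omega)]
    · rw [PySem.List.pyRange_one_eq_nil (by exact_mod_cast (by omega : arr.length ≤ j + 1)),
          List.drop_eq_nil_of_le (by omega : arr.length ≤ j + 1)]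
      simp

-- auxiliary: integer floor-division step (m + 2*l) // 2 = m // 2 + l
theorem fd_step (m l : Int) :
    PySem.Int.floordiv (m + 2 * l) 2 = PySem.Int.floordiv m 2 + l := by
  rw [PySem.Int.floordiv_eq_ediv_of_pos (by norm_num),
      PySem.Int.floordiv_eq_ediv_of_pos (by norm_num)]
  rw [show m + 2 * l = m + l * 2 by ring, Int.add_mul_ediv_right _ _ (by norm_num)]

-- Invariant linking A's (count, length) state with B's (total, cur) state over the pair list.
theorem pair_fold_inv (ps : List (Int × Int)) :
    ∀ (count length : Int),
      ((ps.foldl stepAPair (count, length)).1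
        + PySem.Int.floordiv ((ps.foldl stepAPair (count, length)).2
            * ((ps.foldl stepAPair (count, length)).2 - 1)) 2)
        = (ps.foldl countIncreasingAltStep
            (count + PySem.Int.floordiv (length * (length - 1)) 2, length - 1)).1 := by
  induction ps with
  | nil => intro count length; simp
  | cons p ps ih =>
    intro count length
    simp only [List.foldl_cons]
    by_cases hp : p.2 > p.1
    · rw [show stepAPair (count, length) p = (count, length + 1) by
        unfold stepAPair; rw [if_pos hp]]
      rw [show countIncreasingAltStep
            (count + PySem.Int.floordiv (length * (length - 1)) 2, length - 1) p
          = (count + PySem.Int.floordiv (length * (length - 1)) 2 + length, length) by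
        unfold countIncreasingAltStep
        rw [if_pos hp]
        show (count + PySem.Int.floordiv (length * (length - 1)) 2 + (length - 1 + 1),
              length - 1 + 1) = _
        rw [show length - 1 + 1 = length by ring]]
      rw [ih count (length + 1),
          show (length + 1) * (length + 1 - 1) = length * (length - 1) + 2 * length by ring,
          fd_step]
      ring_nf
    · rw [show stepAPair (count, length) p
          = (count + PySem.Int.floordiv (length * (length - 1)) 2, 1) by
        unfold stepAPair; rw [if_neg hp]]
      rw [show countIncreasingAltStep
            (count + PySem.Int.floordiv (length * (length - 1)) 2, length - 1) p
          = (count + PySem.Int.floordiv (length * (length - 1)) 2 + 0, 0) by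
        unfold countIncreasingAltStep
        rw [if_neg hp]]
      rw [ih (count + PySem.Int.floordiv (length * (length - 1)) 2) 1]
      norm_num

-- ===== VERDICT (by name: the statement is the Claim_ definition above) =====
theorem countIncreasing_spec : Claim_equal_countIncreasing := by
  intro arr _
  have key := foldl_idx_eq_foldl_zip arr arr.length 0 (0, 1) (by omega)
  simp only [Nat.cast_zero, zero_add, List.drop_zero] at key
  simp only [Spec_countIncreasing, countIncreasing, countIncreasing_alt]
  rw [key, pair_fold_inv (arr.zip (arr.drop 1)) 0 1]
  norm_num
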